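-- pv_equiv track=rewrite | github.com/tirfall/Isikukood-3 | Isikukood_Rogovski_3.0/Isikukood_Rogovski_2.0/oma_moodul2.py | naised_mehed
-- ===== SOURCE A (Python) =====
-- def naised_mehed(ikoodid:list)->list:
--     naised = []
--     mehed = []
--     for kood in ikoodid:
--         kood_=list(kood)
--         if int(kood_[0])%2==0:
--             naised.append(kood)
--         else:
--             mehed.append(kood)
--     naised.extend(mehed)
--     ikoodid=naised
--     return naised
-- ===== SOURCE B (Python) =====
-- def naised_mehed(ikoodid: list) -> list:
--     return sorted(ikoodid, key=lambda kood: int(kood[0]) % 2)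
-- ===== Notes on version B (the rewrite author's own statement) =====
-- stated objective: simpler
-- what changed: replaces the explicit two-accumulator partition-and-concatenate loop with a single stable sort keyed on the parity of the first digit
import Mathlib
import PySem

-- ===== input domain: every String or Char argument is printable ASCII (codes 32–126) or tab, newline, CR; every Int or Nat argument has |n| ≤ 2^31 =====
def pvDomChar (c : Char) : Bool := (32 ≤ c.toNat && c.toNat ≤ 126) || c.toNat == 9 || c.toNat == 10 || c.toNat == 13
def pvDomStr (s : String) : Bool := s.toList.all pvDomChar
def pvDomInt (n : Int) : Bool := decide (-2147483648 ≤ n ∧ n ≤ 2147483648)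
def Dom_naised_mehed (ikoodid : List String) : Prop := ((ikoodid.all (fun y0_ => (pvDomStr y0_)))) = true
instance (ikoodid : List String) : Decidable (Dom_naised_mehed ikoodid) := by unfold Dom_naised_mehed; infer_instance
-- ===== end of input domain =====

-- B replaces A's two-accumulator partition loop with one stable sort keyed on first-digit parity (simpler; return value only, neither version mutates its argument observably).

-- ===== PORT A =====
-- int(list(kood)[0]) : index 0 of list(kood), then int() on that one-character string.
-- Pre_ guarantees the index exists and the parse succeeds; the `.getD 0` default is never reached there.
def pvFirstIntA (kood : String) : Int :=
  ((PySem.List.pyGet? kood.toList 0).bind (fun c => PySem.Int.ofStr? (String.ofList [c]))).getD 0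

-- the for-loop over ikoodid carrying the two accumulators (naised, mehed)
def pvLoopA (naised mehed : List String) : List String → List String × List String
  | [] => (naised, mehed)
  | kood :: rest =>
      if PySem.Int.mod (pvFirstIntA kood) 2 = 0 then
        pvLoopA (naised ++ [kood]) mehed rest
      else
        pvLoopA naised (mehed ++ [kood]) rest

def naised_mehed (ikoodid : List String) : List String :=
  let p := pvLoopA [] [] ikoodid
  p.1 ++ p.2

-- ===== PORT B =====
-- the sort key: int(kood[0]) % 2  (same domain note as above)
def pvKeyB (kood : String) : Int :=
  PySem.Int.mod (((PySem.Str.pyGet? kood 0).bind (fun c => PySem.Int.ofStr? (String.ofList [c]))).getD 0) 2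

def naised_mehed_alt (ikoodid : List String) : List String :=
  PySem.List.sorted ikoodid pvKeyB

-- ===== PRECONDITION & SPEC =====
-- Pre_ admits exactly the inputs where A returns: every code is nonempty and starts with
-- an ASCII digit (otherwise int(...) raises IndexError/ValueError in both A and B).
def Pre_naised_mehed (ikoodid : List String) : Prop :=
  ∀ kood ∈ ikoodid, ((kood.toList.head?.map Char.isDigit).getD false) = true
instance (ikoodid : List String) : Decidable (Pre_naised_mehed ikoodid) := by
  unfold Pre_naised_mehed; infer_instance

def pvWitness_naised_mehed : List String := ["49001", "32196", "61203"]

def Spec_naised_mehed (ikoodid : List String) (out : List String) : Prop := out = naised_mehed_alt ikoodid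
instance (ikoodid : List String) (out : List String) : Decidable (Spec_naised_mehed ikoodid out) := by unfold Spec_naised_mehed; infer_instance

-- ===== CLAIM (what is proved, stated in full; the proofs are below) =====
def Claim_equal_naised_mehed : Prop := ∀ (ikoodid : List String), Dom_naised_mehed ikoodid → Pre_naised_mehed ikoodid → Spec_naised_mehed ikoodid (naised_mehed ikoodid)

-- ===== LEMMAS AND PROOFS =====

-- the key only takes the values 0 and 1 (floor mod with positive divisor)
lemma pvKeyB_zero_or_one (kood : String) : pvKeyB kood = 0 ∨ pvKeyB kood = 1 := by
  unfold pvKeyB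
  simp [PySem.Int.mod, Int.fmod_eq_emod]
  omega

lemma pvKeyB_eq_mod (kood : String) : pvKeyB kood = PySem.Int.mod (pvFirstIntA kood) 2 := rfl

-- inserting x into (evens ++ odds): x lands after everything it is not before and
-- before everything it is before
lemma pvInsertBy_middle {α : Type} (before : α → α → Bool) (x : α) (e o : List α)
    (he : ∀ y ∈ e, before x y = false) (ho : ∀ y ∈ o, before x y = true) :
    PySem.List.insertBy before x (e ++ o) = e ++ x :: o := by
  induction e with
  | nil =>
      cases o with
      | nil => simp [PySem.List.insertBy]
      | cons h t => simp [PySem.List.insertBy, ho h (by simp)]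
  | cons a e' ih =>
      simp only [List.cons_append, PySem.List.insertBy, he a (by simp)]
      simp only [Bool.false_eq_true, if_false, List.cons.injEq, true_and]
      exact ih (fun y hy => he y (by simp [hy]))

-- A's stable sort with a {0,1}-valued key is exactly "keys 0 first, keys 1 after",
-- each group in input order
lemma pvSorted_partition (xs : List String) :
    PySem.List.sorted xs pvKeyB =
      xs.filter (fun k => pvKeyB k = 0) ++ xs.filter (fun k => pvKeyB k ≠ 0) := by
  rw [PySem.List.sorted_eq_foldl_insertBy]
  induction xs using List.reverseRecOn with
  | nil => simp
  | append_singleton ys x ih =>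
      rw [List.foldl_append, List.foldl_cons, List.foldl_nil, ih]
      rcases pvKeyB_zero_or_one x with h0 | h1
      · rw [pvInsertBy_middle _ x _ _
            (fun y hy => by
              simp only [List.mem_filter, decide_eq_true_eq] at hy
              simp [h0, hy.2])
            (fun y hy => by
              simp only [List.mem_filter, decide_eq_true_eq] at hy
              rcases pvKeyB_zero_or_one y with h | h
              · exact absurd h hy.2
              · simp [h0, h])]
        simp [List.filter_append, h0]
      · rw [PySem.List.insertBy_of_forall_not_before _ x _
            (fun y hy => by
              simp at hy
              rcases pvKeyB_zero_or_one y with h | h <;> simp [h1, h])]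
        simp [List.filter_append, h1]

-- A's loop appends each code to the matching accumulator, preserving order
lemma pvLoopA_spec (xs : List String) : ∀ (n m : List String),
    pvLoopA n m xs =
      (n ++ xs.filter (fun k => pvKeyB k = 0), m ++ xs.filter (fun k => pvKeyB k ≠ 0)) := by
  induction xs with
  | nil => intro n m; simp [pvLoopA]
  | cons kood rest ih =>
      intro n m
      by_cases h : PySem.Int.mod (pvFirstIntA kood) 2 = 0
      · have hk : pvKeyB kood = 0 := by rw [pvKeyB_eq_mod]; exact h
        simp only [pvLoopA, if_pos h, ih]
        simp [List.filter_cons, hk]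
      · have hk : pvKeyB kood ≠ 0 := by rw [pvKeyB_eq_mod]; exact h
        simp only [pvLoopA, if_neg h, ih]
        simp [List.filter_cons, hk]

-- ===== VERDICT (by name: the statement is the Claim_ definition above) =====
theorem naised_mehed_spec : Claim_equal_naised_mehed := by
  intro ikoodid _ _
  unfold Spec_naised_mehed naised_mehed naised_mehed_alt
  rw [pvSorted_partition, pvLoopA_spec]
  simp
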